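/- GENERATED by tools/from_farm_form.py from prooffarm-gif/accepted/DGifGetScreenDesc.E/Proof.lean (a worked proof of the farm's unit `DGifGetScreenDesc.E`,
   accepted by the verdict) — do not edit. -/
import Gif.Spec.Units.DGifGetScreenDesc_E
import Gif.Spec.AllSegs
import Gif.Spec.Proved.DGifGetScreenDesc_E_Lemmas

open X86 X86.User Asan ProgX.Base ProgX.Base.Spec Gif.Spec

set_option maxRecDepth 4000
set_option maxHeartbeats 4000000

/-!
  `DGifGetScreenDesc.E` (0x1080f7 … the `ret` at 0x108113, 10 instructions; dgif_lib.c:310): THE EPILOGUE OF A PROTECTED FUNCTION,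
  after the recipe of Gif/Spec/FrameCarry.lean (worked: farm.gif/worked/DGifGetWord.E). What differs: the shadow index is in `rbp`,
  the frame is 64 bytes at `RA − 120`, six registers are popped, the result comes from `r12d`, and the heap at the epilogue (`Hc`) is
  not the entry's (`H`): `Returned.same` by `dgsd_epilogue_same2` (Lemmas.lean), the post is `Back2`.
-/

/-- The epilogue of `DGifGetScreenDesc` takes `Done` at 0x1080f7 to `Returned`. -/
theorem Gif.Spec.Proved.DGifGetScreenDesc_E_ok : Gif.Spec.DGifGetScreenDesc_E.Statement := by
  intro Lay hLay μ hμ u₀ hcode H rest frames F R Hc Fc e ret v hat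
  -- 1. THE PRELUDE: the entry assertion `Done` = `Core` + the final heap and forest + the result
  obtain ⟨hcore, hregion, hsameBut, hinv, hok, hres, herr⟩ := hat
  have he := hcore.entry
  v_entry he
  obtain ⟨henv, hrdi, hscm⟩ := hcore.pre
  -- what the walker reads of a segment's entry state: rip, rsp (as `c_rsp`), the registers kept, the text, DF / MXCSR
  have w_rip := hcore.rip
  have c_rsp : v.reg .rsp = e.reg .rsp - 120 := hcore.rsp
  have w_kept : RegsKept [.rsp] v v := RegsKept.refl _ _
  have w_eq : Mem.EqOn ProgX.Base.L.textLo ProgX.Base.L.textHi u₀.mem v.mem := ProgX.Base.conv_code_eqOn hcore.code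
  have hdf := (show abiInv _ from hcore.abi).1
  have hmx := (show abiInv _ from hcore.abi).2
  have hsse := ProgX.Base.sseOK_of_abiInv hcore.abi
  -- the slots the six pops and the `ret` read
  have k_r15 : v.mem.readLE (e.reg .rsp - 8) 8 = (e.reg .r15).toNat := hcore.slot_r15
  have k_r14 : v.mem.readLE (e.reg .rsp - 16) 8 = (e.reg .r14).toNat := hcore.slot_r14
  have k_r13 : v.mem.readLE (e.reg .rsp - 24) 8 = (e.reg .r13).toNat := hcore.slot_r13
  have k_r12 : v.mem.readLE (e.reg .rsp - 32) 8 = (e.reg .r12).toNat := hcore.slot_r12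
  have k_rbp : v.mem.readLE (e.reg .rsp - 40) 8 = (e.reg .rbp).toNat := hcore.slot_rbp
  have k_rbx : v.mem.readLE (e.reg .rsp - 48) 8 = (e.reg .rbx).toNat := hcore.slot_rbx
  have k_ra : UInt64.ofNat (v.mem.readLE (e.reg .rsp) 8) = ret := hcore.slot_ra
  -- the result register `r12` as a variable `z` (0 or 1)
  obtain ⟨z, c_r12⟩ : ∃ z : Word, v.reg .r12 = z := ⟨_, rfl⟩
  rw [c_r12] at hres herr
  -- THE SHADOW INDEX REGISTER AS A VARIABLE `b` WITH BOUNDS: no `>>> 3` is in the walk's context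
  have e120 : (e.reg .rsp - 120).toNat = (e.reg .rsp).toNat - 120 := by u_omega
  obtain ⟨b, hb⟩ : ∃ b : Word, b = (e.reg .rsp - 120) >>> 3 := ⟨_, rfl⟩
  have hbn : b.toNat = ((e.reg .rsp).toNat - 120) / 8 := by
    rw [hb, Asan.toNat_shr3, e120]
  have hb1 : 0xE0000 ≤ b.toNat := by omega
  have hb2 : b.toNat + 8 ≤ 0x100000 := by omega
  have c_rbp : v.reg .rbp = b := by
    rw [hb]
    exact hcore.rbp
  clear hb
  -- 2. THE WALK, to the `ret`: no side goal is left
  u_walk hcode [hμ.vendor] span [ProgX.Base.L.textLo, ProgX.Base.L.textHi] side (v_side)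
  -- 3. THE EPILOGUE'S STORE AS THE LAYOUT'S `storesMem`: the displacement as the walker prints it, granule offset, width, value
  have hepi : Gif.Frames.DGifGetScreenDesc.epilogue = [⟨0, 8, 0⟩] := rfl
  have hmem : s_108113.mem =
      storesMem v.mem (((e.reg .rsp).toNat - 120) / 8) Gif.Frames.DGifGetScreenDesc.epilogue := by
    rw [hepi, w_mem, ← hbn]
    exact stores1_index v.mem b 12582912 0 8 0 (by omega) (by decide) (by decide)
  clear w_mem
  -- 4. THE ENVIRONMENT behind the epilogue, for the final heap `Hc` and forest `Fc`: the callers' frames, the clean stack ends above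
  -- the return address
  obtain ⟨hinv2, hok2, hrem2⟩ := after_epilogue (top := (e.reg .rsp).toNat) (ro := 120) (Fl := Gif.Frames.DGifGetScreenDesc) rfl
    hinv henv.ctx hok he_align he_top henv.heap.inv.frames_above
  -- the frame's shadow span leaves the footprint (the entry's invariant is of `H`, the epilogue's of `Hc`)
  have hsame2 := Gif.Spec.DGifGetScreenDesc_E.dgsd_epilogue_same2 (top := (e.reg .rsp).toNat) (ro := 120) (ro' := 56)
    (Fl := Gif.Frames.DGifGetScreenDesc) rfl rfl henv.heap.inv hinv he_align hcore.same
  rw [← hmem] at hinv2 hok2 hrem2 hsame2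
  -- the result register: `mov eax, r12d` of 0 or 1
  have e_rax : (s_108113.reg .rax).toNat = z.toNat := by
    rw [w_rax, toNat_ofBV32, toNat_part32]
    omega
  -- 5. `Returned`, field by field
  refine ReachVia.done ?_
  refine X86.User.Returned.mk w_rip w_rsp ?saved ?same (ProgX.Base.conv_code_in w_eq) ?abi ?post
  case saved =>
    -- all six callee-saved registers were pushed: the popped values are the walker's facts
    intro r hr
    cases r <;> first
      | exact absurd hr (by decide)
      | (with_reducible assumption)
  case same =>
    simp only [X86.User.Spec.footprint, vspec]
    exact hsame2
  case abi =>
    -- DF and MXCSR by hand (`v_inv` is slow behind a walk with shadow stores)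
    refine ProgX.Base.abiInv_of ?_ ?_
    · rw [w_flags]
      simp only [X86.User.df_setStatus]
      exact hdf
    · rw [w_mxcsr]
      exact hmx
  case post =>
    -- `Back2` (the final heap at the place of the entry's, the environment, the reader did not go back), `SameButScm`, the result,
    -- the error clause of `Done`
    refine ⟨Hc, Fc, ⟨hregion, hinv2, hok2, ?_⟩, hsameBut, ?_, ?_⟩
    · rw [hrem2]
      exact hcore.rem
    · unfold IsBool
      rw [e_rax]
      exact hres
    · rw [e_rax]
      exact herr
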